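-- pv_equiv track=rewrite | github.com/Dend0x/MUNI_FI | ib111/03/03/v3_exponent.py | largest_exponent
-- ===== SOURCE A (Python) =====
-- def largest_exponent(numbers, prime):
--     isStillDivisible = [True for i in range(len(numbers))]
--     numberscop = numbers.copy()
--
--     while sum(isStillDivisible) > 0:
--         copyDiv = isStillDivisible.copy()
--         for index in range(len(numbers)):
--             if isStillDivisible[index]:
--                 if numbers[index] % prime == 0:
--                     numbers[index] //= prime
--                 else:
--                     isStillDivisible[index] = False
--         if sum(isStillDivisible) == 0:
--             isStillDivisible = copyDiv
--             break
--
--     result = []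
--
--     for index, num in enumerate(isStillDivisible):
--         if num:
--             result.append(numberscop[index])
--
--     return min(result)
-- ===== SOURCE B (Python) =====
-- def largest_exponent(numbers, prime):
--     best_e = -1
--     best = None
--     for n in numbers:
--         e = 0
--         m = n
--         while m % prime == 0:
--             m //= prime
--             e += 1
--         if e > best_e or (e == best_e and n < best):
--             best_e = e
--             best = n
--     return best
-- ===== Notes on version B (the rewrite author's own statement) =====
-- stated objective: alternative
-- what changed: Instead of A's round-by-round parallel division of all numbers with flag bookkeeping and a restore-on-break, B computes each number's prime exponent directly and tracks (max exponent, min number attaining it) in one pass; note A mutates its numbers argument in place while B does not.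
-- outside the precondition, e.g. on largest_exponent([], 2): A raises ValueError, B returns None
import Mathlib
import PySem

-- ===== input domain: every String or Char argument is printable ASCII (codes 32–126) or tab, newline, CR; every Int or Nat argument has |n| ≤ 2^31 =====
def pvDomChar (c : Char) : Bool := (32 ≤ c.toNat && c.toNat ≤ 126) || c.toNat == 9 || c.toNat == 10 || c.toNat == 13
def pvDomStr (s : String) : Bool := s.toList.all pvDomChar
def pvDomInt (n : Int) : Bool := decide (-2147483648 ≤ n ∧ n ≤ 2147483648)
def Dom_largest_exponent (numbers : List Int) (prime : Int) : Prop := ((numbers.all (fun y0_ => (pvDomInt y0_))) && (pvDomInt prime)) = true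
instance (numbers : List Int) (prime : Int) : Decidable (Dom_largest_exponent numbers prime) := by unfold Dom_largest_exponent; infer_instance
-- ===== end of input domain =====

-- B replaces A's round-by-round parallel division with flag bookkeeping by a direct
-- one-pass computation of each number's prime exponent, tracking (max exponent, min number
-- attaining it); A mutates its `numbers` argument in place, B does not — the equivalence
-- proved here is about the return value only.

-- ===== PORT A =====
-- one pass of A's inner `for index in range(len(numbers))` loop, acting on (number, flag) pairs
def pvStepA (prime : Int) (l : List (Int × Bool)) : List (Int × Bool) :=
  l.map fun nf =>
    if nf.2 then
      if PySem.Int.mod nf.1 prime = 0 then (PySem.Int.floordiv nf.1 prime, true)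
      else (nf.1, false)
    else nf

-- A's `while sum(isStillDivisible) > 0` loop; fuel only makes the (possibly nonterminating)
-- Python loop total, under Pre_ it is provably sufficient and never alters the result
def pvLoopA (prime : Int) : Nat → List (Int × Bool) → List Bool
  | 0, l => l.map Prod.snd
  | fuel+1, l =>
    if 0 < (l.map Prod.snd).count true then
      let l' := pvStepA prime l
      if (l'.map Prod.snd).count true = 0 then l.map Prod.snd
      else pvLoopA prime fuel l'
    else l.map Prod.snd

def largest_exponent (numbers : List Int) (prime : Int) : Int :=
  let fuel := numbers.foldl (fun a n => a + n.natAbs) 0 + 2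
  let flags := pvLoopA prime fuel (numbers.map fun n => (n, true))
  let result := (numbers.zip flags).filterMap fun nf => if nf.2 then some nf.1 else none
  (PySem.List.min? result (fun x => x)).getD 0

-- ===== PORT B =====
-- B's inner `while m % prime == 0` loop; fuel n.natAbs is provably sufficient for n ≠ 0
def pvExpB (prime : Int) : Nat → Int → Nat
  | 0, _ => 0
  | f+1, m =>
    if PySem.Int.mod m prime = 0 then pvExpB prime f (PySem.Int.floordiv m prime) + 1
    else 0

def largest_exponent_alt (numbers : List Int) (prime : Int) : Int :=
  (numbers.foldl (fun acc n =>
      let e : Int := (pvExpB prime n.natAbs n : Int)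
      if acc.1 < e ∨ (e = acc.1 ∧ n < acc.2) then (e, n) else acc)
    ((-1 : Int), (0 : Int))).2

-- ===== PRECONDITION & SPEC =====
-- Pre_ excludes exactly the inputs on which Python A does not return normally: the empty
-- list (min([]) raises ValueError), prime = 0 (ZeroDivisionError), |prime| = 1 and lists
-- containing 0 (the while loop never terminates).
def Pre_largest_exponent (numbers : List Int) (prime : Int) : Prop :=
  numbers ≠ [] ∧ 2 ≤ prime.natAbs ∧ ∀ n ∈ numbers, n ≠ 0

instance (numbers : List Int) (prime : Int) : Decidable (Pre_largest_exponent numbers prime) := by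
  unfold Pre_largest_exponent; infer_instance

def pvWitness_largest_exponent : List Int × Int := ([12, 8, 7, 24], 2)

def Spec_largest_exponent (numbers : List Int) (prime : Int) (out : Int) : Prop := out = largest_exponent_alt numbers prime
instance (numbers : List Int) (prime : Int) (out : Int) : Decidable (Spec_largest_exponent numbers prime out) := by unfold Spec_largest_exponent; infer_instance

-- ===== CLAIM (what is proved, stated in full; the proofs are below) =====
def Claim_equal_largest_exponent : Prop := ∀ (numbers : List Int) (prime : Int), Dom_largest_exponent numbers prime → Pre_largest_exponent numbers prime → Spec_largest_exponent numbers prime (largest_exponent numbers prime)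

-- ===== LEMMAS AND PROOFS =====

-- the prime-power exponent of n, defined through B's fueled loop
def pvE (prime n : Int) : Nat := pvExpB prime n.natAbs n

-- n after r exact divisions by prime
def pvDivs (prime : Int) : Nat → Int → Int
  | 0, n => n
  | r+1, n => PySem.Int.floordiv (pvDivs prime r n) prime

-- the state of A's (number, flag) pair for original entry n after r rounds of the while loop
def pvPhi (prime : Int) (r : Nat) (n : Int) : Int × Bool :=
  (if r ≤ pvE prime n then pvDivs prime r n else pvDivs prime (pvE prime n) n,
   decide (r ≤ pvE prime n))

def pvMaxE (prime : Int) (l : List Int) : Int :=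
  (l.map fun n => ((pvE prime n : Int))).foldl max (-1)

def pvMinAt (prime : Int) (l : List Int) (v : Int) : Int :=
  match l.filter (fun n => decide (((pvE prime n : Int)) = v)) with
  | [] => 0
  | x :: t => t.foldl min x

lemma pv_fd_mul {prime n : Int} (h : PySem.Int.mod n prime = 0) :
    PySem.Int.floordiv n prime * prime = n := by
  have := PySem.Int.floordiv_mul_add_mod n prime
  rw [h] at this; linarith

lemma pv_cof {prime n : Int} (hp : 2 ≤ prime.natAbs) (hn : n ≠ 0)
    (h : PySem.Int.mod n prime = 0) :
    PySem.Int.floordiv n prime ≠ 0 ∧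
      (PySem.Int.floordiv n prime).natAbs < n.natAbs := by
  set c := PySem.Int.floordiv n prime with hc
  have hm : c * prime = n := pv_fd_mul h
  have hc0 : c ≠ 0 := by
    intro h0
    apply hn
    rw [h0, zero_mul] at hm
    exact hm.symm
  refine ⟨hc0, ?_⟩
  have h1 : c.natAbs * prime.natAbs = n.natAbs := by
    rw [← Int.natAbs_mul, hm]
  have h2 : 1 ≤ c.natAbs := Int.natAbs_pos.mpr hc0
  calc c.natAbs < c.natAbs * 2 := by omega
    _ ≤ c.natAbs * prime.natAbs := Nat.mul_le_mul_left _ hp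
    _ = n.natAbs := h1

lemma pvExpB_fuel {prime : Int} (hp : 2 ≤ prime.natAbs) :
    ∀ f g n, n ≠ 0 → n.natAbs ≤ g → g ≤ f → pvExpB prime g n = pvE prime n := by
  intro f
  induction f with
  | zero =>
      intro g n hn hg hf
      have := Int.natAbs_pos.mpr hn; omega
  | succ f ih =>
      intro g n hn hg hf
      have hpos := Int.natAbs_pos.mpr hn
      obtain ⟨g', rfl⟩ : ∃ g', g = g' + 1 := ⟨g - 1, by omega⟩
      obtain ⟨k, hk⟩ : ∃ k, n.natAbs = k + 1 := ⟨n.natAbs - 1, by omega⟩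
      unfold pvE
      rw [hk]
      by_cases h : PySem.Int.mod n prime = 0
      · obtain ⟨hc0, hlt⟩ := pv_cof hp hn h
        simp only [pvExpB, h, if_pos rfl]
        have e1 : pvExpB prime g' (PySem.Int.floordiv n prime) = pvE prime (PySem.Int.floordiv n prime) :=
          ih g' _ hc0 (by omega) (by omega)
        have e2 : pvExpB prime k (PySem.Int.floordiv n prime) = pvE prime (PySem.Int.floordiv n prime) :=
          ih k _ hc0 (by omega) (by omega)
        rw [e1, e2]
      · simp [pvExpB, h]

lemma pvE_unfold {prime : Int} (hp : 2 ≤ prime.natAbs) {n : Int} (hn : n ≠ 0) :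
    pvE prime n =
      if PySem.Int.mod n prime = 0 then pvE prime (PySem.Int.floordiv n prime) + 1
      else 0 := by
  have hpos := Int.natAbs_pos.mpr hn
  obtain ⟨k, hk⟩ : ∃ k, n.natAbs = k + 1 := ⟨n.natAbs - 1, by omega⟩
  conv_lhs => rw [pvE, hk]
  by_cases h : PySem.Int.mod n prime = 0
  · obtain ⟨hc0, hlt⟩ := pv_cof hp hn h
    simp only [pvExpB, h, if_pos rfl, if_pos]
    rw [pvExpB_fuel hp k k _ hc0 (by omega) le_rfl]
  · simp [pvExpB, h]

lemma pvE_lt_natAbs {prime : Int} (hp : 2 ≤ prime.natAbs) :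
    ∀ k n, n ≠ 0 → n.natAbs ≤ k → pvE prime n < n.natAbs := by
  intro k
  induction k with
  | zero => intro n hn h; have := Int.natAbs_pos.mpr hn; omega
  | succ k ih =>
      intro n hn h
      have hpos := Int.natAbs_pos.mpr hn
      rw [pvE_unfold hp hn]
      by_cases hm : PySem.Int.mod n prime = 0
      · obtain ⟨hc0, hlt⟩ := pv_cof hp hn hm
        have := ih _ hc0 (by omega)
        rw [if_pos hm]
        omega
      · simp [hm]; omega

lemma pvDivs_spec {prime : Int} (hp : 2 ≤ prime.natAbs) :
    ∀ (r : Nat) (n : Int), n ≠ 0 → r ≤ pvE prime n →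
      pvDivs prime r n ≠ 0 ∧ pvE prime (pvDivs prime r n) = pvE prime n - r := by
  intro r
  induction r with
  | zero => intro n hn _; exact ⟨hn, by simp [pvDivs]⟩
  | succ r ih =>
      intro n hn hr
      obtain ⟨hm0, hmE⟩ := ih n hn (by omega)
      set m := pvDivs prime r n with hm
      have hEm : 1 ≤ pvE prime m := by omega
      have hdvd : PySem.Int.mod m prime = 0 := by
        by_contra hc
        rw [pvE_unfold hp hm0] at hEm
        simp [hc] at hEm
      have hun := pvE_unfold hp hm0
      rw [if_pos hdvd] at hun
      obtain ⟨hc0, _⟩ := pv_cof hp hm0 hdvd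
      refine ⟨hc0, ?_⟩
      show pvE prime (PySem.Int.floordiv m prime) = pvE prime n - (r + 1)
      omega

lemma pvPhi_step {prime : Int} (hp : 2 ≤ prime.natAbs) {n : Int} (hn : n ≠ 0) (r : Nat) :
    (if (pvPhi prime r n).2 then
        if PySem.Int.mod (pvPhi prime r n).1 prime = 0 then
          (PySem.Int.floordiv (pvPhi prime r n).1 prime, true)
        else ((pvPhi prime r n).1, false)
      else pvPhi prime r n) = pvPhi prime (r+1) n := by
  by_cases hr : r ≤ pvE prime n
  · obtain ⟨hm0, hmE⟩ := pvDivs_spec hp r n hn hr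
    simp only [pvPhi, if_pos hr, decide_eq_true_eq, hr, decide_true, if_pos]
    by_cases hlt : r + 1 ≤ pvE prime n
    · have hdvd : PySem.Int.mod (pvDivs prime r n) prime = 0 := by
        by_contra hc
        have := pvE_unfold hp hm0
        rw [if_neg hc] at this
        omega
      simp [hdvd, hlt, pvDivs]
    · have heq : pvE prime n = r := by omega
      have hnd : ¬ PySem.Int.mod (pvDivs prime r n) prime = 0 := by
        intro hc
        have := pvE_unfold hp hm0
        rw [if_pos hc] at this
        omega
      simp [hnd, hlt, heq]
  · have hr1 : ¬ r + 1 ≤ pvE prime n := by omega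
    simp [pvPhi, hr, hr1]

lemma pvStepA_phi {prime : Int} (hp : 2 ≤ prime.natAbs) (l : List Int)
    (hl : ∀ n ∈ l, n ≠ 0) (r : Nat) :
    pvStepA prime (l.map (pvPhi prime r)) = l.map (pvPhi prime (r+1)) := by
  unfold pvStepA
  rw [List.map_map]
  exact List.map_congr_left fun n hn => pvPhi_step hp (hl n hn) r

lemma pv_count_phi (prime : Int) (l : List Int) (r : Nat) :
    (((l.map (pvPhi prime r)).map Prod.snd).count true = 0) ↔
      ∀ n ∈ l, ¬ r ≤ pvE prime n := by
  rw [List.map_map, List.count_eq_zero]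
  simp [pvPhi]

lemma pv_loop_char {prime : Int} (hp : 2 ≤ prime.natAbs) (l : List Int)
    (hl : ∀ n ∈ l, n ≠ 0) (M : Nat)
    (hMb : ∀ n ∈ l, pvE prime n ≤ M) (hMa : ∃ n ∈ l, pvE prime n = M) :
    ∀ (fuel r : Nat), r ≤ M → M + 1 - r ≤ fuel →
      pvLoopA prime fuel (l.map (pvPhi prime r)) =
        l.map (fun n => decide (pvE prime n = M)) := by
  intro fuel
  induction fuel with
  | zero => intro r hr hf; omega
  | succ fuel ih =>
      intro r hr hf
      obtain ⟨n₀, hn₀, hE₀⟩ := hMa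
      have hcond : 0 < ((l.map (pvPhi prime r)).map Prod.snd).count true := by
        rcases Nat.eq_zero_or_pos (((l.map (pvPhi prime r)).map Prod.snd).count true) with h | h
        · exact absurd (((pv_count_phi prime l r).mp h) n₀ hn₀) (by omega)
        · exact h
      rw [pvLoopA, if_pos hcond, pvStepA_phi hp l hl r]
      by_cases hz : ((l.map (pvPhi prime (r+1))).map Prod.snd).count true = 0
      · rw [if_pos hz]
        have hall := (pv_count_phi prime l (r+1)).mp hz
        have hrM : r = M := by
          have := hall n₀ hn₀; omega
        rw [List.map_map]
        refine List.map_congr_left fun n hn => ?_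
        have h1 := hMb n hn
        have h2 := hall n hn
        simp only [Function.comp, pvPhi]
        subst hrM
        simp only [decide_eq_decide]
        omega
      · rw [if_neg hz]
        have hex : ∃ n ∈ l, r + 1 ≤ pvE prime n := by
          by_contra hc
          push_neg at hc
          exact hz ((pv_count_phi prime l (r+1)).mpr fun n hn => by
            intro h; exact absurd h (by have := hc n hn; omega))
        obtain ⟨n₁, hn₁, hE₁⟩ := hex
        have hr1 : r + 1 ≤ M := le_trans hE₁ (hMb n₁ hn₁)
        exact ih (r+1) hr1 (by omega)

lemma pv_foldl_sum_init (l : List Int) :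
    ∀ init : Nat, init ≤ l.foldl (fun a x => a + x.natAbs) init := by
  induction l with
  | nil => intro init; simp
  | cons x t ih =>
      intro init
      calc init ≤ init + x.natAbs := by omega
        _ ≤ _ := ih (init + x.natAbs)

lemma pv_mem_le_sum (l : List Int) :
    ∀ (init : Nat) (n : Int), n ∈ l →
      n.natAbs ≤ l.foldl (fun a x => a + x.natAbs) init := by
  induction l with
  | nil => intro _ n h; cases h
  | cons x t ih =>
      intro init n h
      rcases List.mem_cons.mp h with rfl | h
      · calc n.natAbs ≤ init + n.natAbs := by omega
          _ ≤ _ := pv_foldl_sum_init t _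
      · exact ih _ n h

lemma pv_zip_filter (f : Int → Bool) :
    ∀ l : List Int,
      ((l.zip (l.map f)).filterMap fun nf => if nf.2 then some nf.1 else none) =
        l.filter f := by
  intro l
  induction l with
  | nil => simp
  | cons x t ih =>
      simp only [List.map_cons, List.zip_cons_cons, List.filterMap_cons, List.filter_cons]
      cases h : f x <;> simp [ih]

lemma pv_le_maxE (prime : Int) (l : List Int) :
    ∀ n ∈ l, ((pvE prime n : Int)) ≤ pvMaxE prime l := by
  intro n hn
  have := (PySem.List.le_foldl_max (l.map fun n => ((pvE prime n : Int))) (-1)).2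
  exact this _ (List.mem_map_of_mem hn)

lemma pv_maxE_append (prime : Int) (l : List Int) (x : Int) :
    pvMaxE prime (l ++ [x]) = max (pvMaxE prime l) ((pvE prime x : Int)) := by
  simp [pvMaxE, List.foldl_append]

lemma pv_maxE_mem (prime : Int) :
    ∀ l : List Int, l ≠ [] → ∃ n ∈ l, ((pvE prime n : Int)) = pvMaxE prime l := by
  intro l
  induction l using List.reverseRecOn with
  | nil => intro h; exact absurd rfl h
  | append_singleton l x ih =>
      intro _
      rw [pv_maxE_append]
      rcases eq_or_ne l [] with rfl | hl
      · refine ⟨x, by simp, ?_⟩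
        simp [pvMaxE]
      · obtain ⟨n, hn, hE⟩ := ih hl
        rcases le_total (pvMaxE prime l) ((pvE prime x : Int)) with h | h
        · exact ⟨x, by simp, by omega⟩
        · exact ⟨n, by simp [hn], by omega⟩

lemma pv_foldB_inv (prime : Int) :
    ∀ l : List Int, l ≠ [] →
      l.foldl (fun acc n =>
          let e : Int := (pvExpB prime n.natAbs n : Int)
          if acc.1 < e ∨ (e = acc.1 ∧ n < acc.2) then (e, n) else acc)
        ((-1 : Int), (0 : Int)) =
        (pvMaxE prime l, pvMinAt prime l (pvMaxE prime l)) := by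
  intro l
  induction l using List.reverseRecOn with
  | nil => intro h; exact absurd rfl h
  | append_singleton l x ih =>
      intro _
      rcases eq_or_ne l [] with rfl | hl
      · simp only [List.nil_append, List.foldl_cons, List.foldl_nil]
        have h0 : (0:Int) ≤ ((pvExpB prime x.natAbs x : Int)) := Int.natCast_nonneg _
        rw [if_pos (Or.inl (by omega))]
        have hmax : pvMaxE prime [x] = ((pvExpB prime x.natAbs x : Int)) := by
          simp only [pvMaxE, pvE, List.map_cons, List.map_nil, List.foldl_cons, List.foldl_nil]
          exact max_eq_right (by omega)
        rw [hmax]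
        simp [pvMinAt, pvE]
      · rw [List.foldl_append, ih hl]
        simp only [List.foldl_cons, List.foldl_nil]
        rw [pv_maxE_append]
        set e : Int := ((pvE prime x : Int)) with he
        set Ml := pvMaxE prime l with hMl
        set ml := pvMinAt prime l Ml with hml
        rw [show ((pvExpB prime x.natAbs x : Int)) = e from rfl]
        obtain ⟨n₀, hn₀, hE₀⟩ := pv_maxE_mem prime l hl
        rw [← hMl] at hE₀
        have hfl : l.filter (fun n => decide (((pvE prime n : Int)) = Ml)) ≠ [] := by
          intro hc
          have hmem : n₀ ∈ l.filter (fun n => decide (((pvE prime n : Int)) = Ml)) :=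
            List.mem_filter.mpr ⟨hn₀, by simp only [decide_eq_true_eq]; exact hE₀⟩
          rw [hc] at hmem; cases hmem
        rcases lt_trichotomy Ml e with hlt | heq | hgt
        · rw [if_pos (Or.inl hlt)]
          have hmax : max Ml e = e := by omega
          rw [hmax]
          have hfilter : (l ++ [x]).filter (fun n => decide (((pvE prime n : Int)) = e)) = [x] := by
            rw [List.filter_append]
            have hnil : l.filter (fun n => decide (((pvE prime n : Int)) = e)) = [] := by
              rw [List.filter_eq_nil_iff]
              intro n hn
              have hle := pv_le_maxE prime l n hn
              rw [← hMl] at hle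
              simp only [decide_eq_true_eq]
              omega
            simp [hnil, ← he]
          have hm1 : pvMinAt prime (l ++ [x]) e = x := by
            simp only [pvMinAt, hfilter, List.foldl_nil]
          rw [hm1]
        · have hfilter : (l ++ [x]).filter (fun n => decide (((pvE prime n : Int)) = Ml)) =
              l.filter (fun n => decide (((pvE prime n : Int)) = Ml)) ++ [x] := by
            rw [List.filter_append]
            have hx1 : ((pvE prime x : Int)) = Ml := by omega
            simp [hx1]
          have hminapp : pvMinAt prime (l ++ [x]) Ml = min ml x := by
            rw [pvMinAt, hfilter]
            obtain ⟨y, t, hyt⟩ := List.exists_cons_of_ne_nil hfl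
            rw [hyt]
            simp only [List.cons_append]
            rw [hml, pvMinAt, hyt]
            simp [List.foldl_append]
          have hmax : max Ml e = Ml := by omega
          rw [hmax, hminapp]
          by_cases hx : x < ml
          · rw [if_pos (Or.inr ⟨heq.symm, hx⟩)]
            have hmin : min ml x = x := by omega
            rw [hmin]
            exact Prod.ext (by omega) rfl
          · rw [if_neg (by rintro (h | ⟨-, h⟩) <;> omega)]
            have hmin : min ml x = ml := by omega
            rw [hmin]
        · rw [if_neg (by rintro (h | ⟨h, -⟩) <;> omega)]
          have hmax : max Ml e = Ml := by omega
          rw [hmax]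
          have hfilter : (l ++ [x]).filter (fun n => decide (((pvE prime n : Int)) = Ml)) =
              l.filter (fun n => decide (((pvE prime n : Int)) = Ml)) := by
            rw [List.filter_append]
            have hx0 : [x].filter (fun n => decide (((pvE prime n : Int)) = Ml)) = [] := by
              have hx1 : ((pvE prime x : Int)) ≠ Ml := by omega
              simp [hx1]
            simp [hx0]
          rw [hml, pvMinAt, pvMinAt, hfilter]

-- ===== VERDICT (by name: the statement is the Claim_ definition above) =====
theorem largest_exponent_spec : Claim_equal_largest_exponent := by
  intro numbers prime _ hpre
  obtain ⟨hne, hp, h0⟩ := hpre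
  unfold Spec_largest_exponent largest_exponent largest_exponent_alt
  -- B's side: the fold computes (max exponent, min attaining number)
  rw [pv_foldB_inv prime numbers hne]
  simp only []
  -- A's side
  obtain ⟨n₀, hn₀, hE₀⟩ := pv_maxE_mem prime numbers hne
  set M : Nat := pvE prime n₀ with hM
  have hMcast : pvMaxE prime numbers = (M : Int) := hE₀.symm
  have hMb : ∀ n ∈ numbers, pvE prime n ≤ M := by
    intro n hn
    have := pv_le_maxE prime numbers n hn
    rw [hMcast] at this
    exact_mod_cast this
  -- initial state is pvPhi 0
  have hinit : numbers.map (fun n => (n, true)) = numbers.map (pvPhi prime 0) := by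
    refine List.map_congr_left fun n hn => ?_
    simp [pvPhi, pvDivs]
  rw [hinit]
  -- fuel is sufficient
  have hfuel : M + 1 - 0 ≤ numbers.foldl (fun a n => a + n.natAbs) 0 + 2 := by
    have h1 : pvE prime n₀ < n₀.natAbs :=
      pvE_lt_natAbs hp n₀.natAbs n₀ (h0 n₀ hn₀) le_rfl
    have h2 := pv_mem_le_sum numbers 0 n₀ hn₀
    omega
  rw [pv_loop_char hp numbers h0 M hMb ⟨n₀, hn₀, rfl⟩ _ 0 (Nat.zero_le M) hfuel]
  rw [pv_zip_filter]
  -- the filtered list is nonempty and its min is pvMinAt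
  have hfilter_eq : numbers.filter (fun n => decide (pvE prime n = M)) =
      numbers.filter (fun n => decide (((pvE prime n : Int)) = pvMaxE prime numbers)) := by
    refine List.filter_congr fun n hn => ?_
    rw [hMcast]
    simp only [decide_eq_decide]
    exact_mod_cast Iff.rfl
  rw [hfilter_eq]
  have hfl : numbers.filter (fun n => decide (((pvE prime n : Int)) = pvMaxE prime numbers)) ≠ [] := by
    intro hc
    have : n₀ ∈ numbers.filter (fun n => decide (((pvE prime n : Int)) = pvMaxE prime numbers)) :=
      List.mem_filter.mpr ⟨hn₀, by simp only [decide_eq_true_eq]; exact hE₀⟩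
    rw [hc] at this; cases this
  obtain ⟨y, t, hyt⟩ := List.exists_cons_of_ne_nil hfl
  rw [hyt, PySem.List.min?_id_cons, Option.getD_some, pvMinAt, hyt]
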